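-- pv_equiv track=rewrite | github.com/0X6C7879/aegissec | apps/api/app/graphs/builders.py | _classify_execution_stage
-- ===== SOURCE A (Python) =====
-- def _classify_execution_stage(value: str | None) -> str:
--     if not value:
--         return "unknown"
--     normalized = value.casefold()
--     if any(token in normalized for token in ("exploit", "weapon", "inject", "execute")):
--         return "exploit"
--     if any(token in normalized for token in ("pivot", "lateral", "post", "movement")):
--         return "pivot"
--     if any(
--         token in normalized for token in ("valid", "verify", "safe_validation", "auth", "check")
--     ):
--         return "validation"
--     if any(token in normalized for token in ("report", "outcome", "summary", "impact")):
--         return "outcome"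
--     if any(token in normalized for token in ("recon", "collect", "surface", "enum", "context")):
--         return "reconnaissance"
--     return "unknown"
-- ===== SOURCE B (Python) =====
-- LABELS = ("exploit", "pivot", "validation", "outcome", "reconnaissance", "unknown")
--
-- TOKEN_RANK = {
--     "exploit": 0, "weapon": 0, "inject": 0, "execute": 0,
--     "pivot": 1, "lateral": 1, "post": 1, "movement": 1,
--     "valid": 2, "verify": 2, "safe_validation": 2, "auth": 2, "check": 2,
--     "report": 3, "outcome": 3, "summary": 3, "impact": 3,
--     "recon": 4, "collect": 4, "surface": 4, "enum": 4, "context": 4,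
-- }
--
--
-- def _classify_execution_stage(value: str | None) -> str:
--     if not value:
--         return "unknown"
--     normalized = value.casefold()
--     best = 5
--     for token, rank in TOKEN_RANK.items():
--         if token in normalized:
--             best = min(best, rank)
--     return LABELS[best]
-- ===== Notes on version B (the rewrite author's own statement) =====
-- stated objective: alternative
-- what changed: B replaces A's ordered early-return group checks with a single fold over a flat token-to-rank map that accumulates the minimum matched rank (sentinel 5) and indexes a label table with it; earlier categories win because their ranks are smaller.
import Mathlib
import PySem

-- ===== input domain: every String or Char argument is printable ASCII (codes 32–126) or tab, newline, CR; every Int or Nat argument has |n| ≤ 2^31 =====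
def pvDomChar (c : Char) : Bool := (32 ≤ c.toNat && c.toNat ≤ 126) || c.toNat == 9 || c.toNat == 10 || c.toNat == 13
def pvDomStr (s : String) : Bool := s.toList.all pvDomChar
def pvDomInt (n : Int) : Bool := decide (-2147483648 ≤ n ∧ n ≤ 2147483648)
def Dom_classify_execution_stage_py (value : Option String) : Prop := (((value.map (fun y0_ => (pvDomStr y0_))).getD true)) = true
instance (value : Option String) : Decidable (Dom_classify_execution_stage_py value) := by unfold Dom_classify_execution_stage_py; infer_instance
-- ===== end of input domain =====

-- B replaces A's ordered early-return group checks with a single fold over a flat token→rank map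
-- accumulating the minimum matched rank (sentinel 5), then indexes a label table (alternative, same cost).
-- str.casefold is ported as PySem.Str.lower: identical on the ASCII domain.

-- ===== PORT A =====
def classify_execution_stage_py (value : Option String) : String :=
  match value with
  | none => "unknown"
  | some v =>
    if v = "" then "unknown"
    else
      let normalized := PySem.Str.lower v
      if ["exploit", "weapon", "inject", "execute"].any (fun t => PySem.Str.isIn t normalized) then "exploit"
      else if ["pivot", "lateral", "post", "movement"].any (fun t => PySem.Str.isIn t normalized) then "pivot"
      else if ["valid", "verify", "safe_validation", "auth", "check"].any (fun t => PySem.Str.isIn t normalized) then "validation"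
      else if ["report", "outcome", "summary", "impact"].any (fun t => PySem.Str.isIn t normalized) then "outcome"
      else if ["recon", "collect", "surface", "enum", "context"].any (fun t => PySem.Str.isIn t normalized) then "reconnaissance"
      else "unknown"

-- ===== PORT B =====
def pvLabels : List String :=
  ["exploit", "pivot", "validation", "outcome", "reconnaissance", "unknown"]

def pvTokenRank : List (String × Nat) :=
  [("exploit", 0), ("weapon", 0), ("inject", 0), ("execute", 0),
   ("pivot", 1), ("lateral", 1), ("post", 1), ("movement", 1),
   ("valid", 2), ("verify", 2), ("safe_validation", 2), ("auth", 2), ("check", 2),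
   ("report", 3), ("outcome", 3), ("summary", 3), ("impact", 3),
   ("recon", 4), ("collect", 4), ("surface", 4), ("enum", 4), ("context", 4)]

def classify_execution_stage_py_alt (value : Option String) : String :=
  match value with
  | none => "unknown"
  | some v =>
    if v = "" then "unknown"
    else
      let normalized := PySem.Str.lower v
      -- 'for token, rank in TOKEN_RANK.items(): if token in normalized: best = min(best, rank)'
      let best := pvTokenRank.foldl
        (fun best p => if PySem.Str.isIn p.1 normalized then min best p.2 else best) 5
      pvLabels.getD best "unknown"

-- ===== PRECONDITION & SPEC =====
def Spec_classify_execution_stage_py (value : Option String) (out : String) : Prop := out = classify_execution_stage_py_alt value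
instance (value : Option String) (out : String) : Decidable (Spec_classify_execution_stage_py value out) := by unfold Spec_classify_execution_stage_py; infer_instance

-- ===== CLAIM (what is proved, stated in full; the proofs are below) =====
def Claim_equal_classify_execution_stage_py : Prop := ∀ (value : Option String), Dom_classify_execution_stage_py value → Spec_classify_execution_stage_py value (classify_execution_stage_py value)

-- ===== LEMMAS AND PROOFS =====

-- B's fold over a block of tokens that all carry the same rank r: it lowers the
-- accumulator to (min acc r) exactly when some token of the block matches.
theorem pv_fold_block (n : String) (r : Nat) (ts : List String) (acc : Nat) :
    ((ts.map (fun t => (t, r))).foldl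
        (fun best p => if PySem.Str.isIn p.1 n then min best p.2 else best) acc)
      = if ts.any (fun t => PySem.Str.isIn t n) then min acc r else acc := by
  induction ts generalizing acc with
  | nil => simp
  | cons t ts ih =>
    simp only [List.map_cons, List.foldl_cons, List.any_cons, ih]
    by_cases h : PySem.Chars.isIn t.toList n.toList <;> simp [h]

-- ===== VERDICT (by name: the statement is the Claim_ definition above) =====
theorem classify_execution_stage_py_spec : Claim_equal_classify_execution_stage_py := by
  intro value _
  unfold Spec_classify_execution_stage_py classify_execution_stage_py classify_execution_stage_py_alt
  cases value with
  | none => rfl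
  | some v =>
    by_cases hv : v = ""
    · simp [hv]
    · simp only [hv, if_false]
      have hsplit : pvTokenRank =
          (["exploit", "weapon", "inject", "execute"].map (fun t => (t, 0)))
          ++ (["pivot", "lateral", "post", "movement"].map (fun t => (t, 1)))
          ++ (["valid", "verify", "safe_validation", "auth", "check"].map (fun t => (t, 2)))
          ++ (["report", "outcome", "summary", "impact"].map (fun t => (t, 3)))
          ++ (["recon", "collect", "surface", "enum", "context"].map (fun t => (t, 4))) := by
        rfl
      simp only [hsplit, List.foldl_append, pv_fold_block]
      split_ifs <;> simp [pvLabels]
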